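-- pv_equiv track=rewrite | github.com/opendatalab/MinerU | build/lib/magic_pdf/layout/bbox_sort.py | get_and_set_idx_x_2
-- ===== SOURCE A (Python) =====
-- X0_IDX = 0
--
-- Y0_IDX = 1
--
-- X1_IDX = 2
--
-- Y1_IDX = 3
--
-- IDX_X = 5
--
-- def find_left_nearest_bbox(this_bbox, all_bboxes) -> list:
--     """
--     在all_bboxes里找到所有右侧高度和this_bbox有重叠的bbox
--     """
--     left_boxes = [box for box in all_bboxes if box[X1_IDX] <= this_bbox[X0_IDX] and any([
--          box[Y0_IDX] < this_bbox[Y0_IDX] < box[Y1_IDX], box[Y0_IDX] < this_bbox[Y1_IDX] < box[Y1_IDX],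
--          this_bbox[Y0_IDX] < box[Y0_IDX] < this_bbox[Y1_IDX], this_bbox[Y0_IDX] < box[Y1_IDX] < this_bbox[Y1_IDX],
--          box[Y0_IDX]==this_bbox[Y0_IDX] and box[Y1_IDX]==this_bbox[Y1_IDX]])]
--
--     # 然后再过滤一下，找到水平上距离this_bbox最近的那个
--     if len(left_boxes) > 0:
--         left_boxes.sort(key=lambda x: x[X1_IDX], reverse=True)
--         left_boxes = [left_boxes[0]]
--     else:
--         left_boxes = []
--     return left_boxes
--
-- def get_and_set_idx_x_2(this_bbox, all_bboxes):
--     """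
--     寻找this_bbox在all_bboxes中的被直接遮挡的深度 idx_x
--     这个遮挡深度不考虑延长线，而是被实际的长或者宽遮挡的情况
--     """
--     if this_bbox[IDX_X] is not None:
--         return this_bbox[IDX_X]
--     else:
--         left_nearest_bbox = find_left_nearest_bbox(this_bbox, all_bboxes)
--         if len(left_nearest_bbox) == 0:
--             this_bbox[IDX_X] = 0
--         else:
--             left_idx_x = get_and_set_idx_x_2(left_nearest_bbox[0], all_bboxes)
--             this_bbox[IDX_X] = left_idx_x + 1
--         return this_bbox[IDX_X]
-- ===== SOURCE B (Python) =====
-- X0_IDX = 0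
--
-- Y0_IDX = 1
--
-- X1_IDX = 2
--
-- Y1_IDX = 3
--
-- IDX_X = 5
--
-- def _overlaps(this_bbox, box):
--     return (box[Y0_IDX] < this_bbox[Y0_IDX] < box[Y1_IDX]
--             or box[Y0_IDX] < this_bbox[Y1_IDX] < box[Y1_IDX]
--             or this_bbox[Y0_IDX] < box[Y0_IDX] < this_bbox[Y1_IDX]
--             or this_bbox[Y0_IDX] < box[Y1_IDX] < this_bbox[Y1_IDX]
--             or (box[Y0_IDX] == this_bbox[Y0_IDX] and box[Y1_IDX] == this_bbox[Y1_IDX]))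
--
-- def get_and_set_idx_x_2(this_bbox, all_bboxes):
--     # Iterative chain walk: collect the not-yet-indexed boxes, pick each left
--     # neighbour by a single max() scan (no sort), then assign depths back-to-front.
--     chain = []
--     cur = this_bbox
--     while cur[IDX_X] is None:
--         cands = [b for b in all_bboxes
--                  if b[X1_IDX] <= cur[X0_IDX] and _overlaps(cur, b)]
--         if not cands:
--             break
--         chain.append(cur)
--         cur = max(cands, key=lambda b: b[X1_IDX])
--     base = cur[IDX_X]
--     if base is None:
--         base = 0
--         cur[IDX_X] = 0
--     for box in reversed(chain):
--         base += 1
--         box[IDX_X] = base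
--     return this_bbox[IDX_X]
-- ===== Notes on version B (the rewrite author's own statement) =====
-- stated objective: alternative
-- what changed: Replaces the self-memoizing recursion with an iterative chain walk that picks each left neighbour by a single max() scan instead of filter+sort and assigns depths back-to-front from the base value.
-- outside the precondition, e.g. on get_and_set_idx_x_2([0, 0, 1, 1, None, None], [[None, None, 6, None, None]]): A returns 0, B returns 0
import Mathlib
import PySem

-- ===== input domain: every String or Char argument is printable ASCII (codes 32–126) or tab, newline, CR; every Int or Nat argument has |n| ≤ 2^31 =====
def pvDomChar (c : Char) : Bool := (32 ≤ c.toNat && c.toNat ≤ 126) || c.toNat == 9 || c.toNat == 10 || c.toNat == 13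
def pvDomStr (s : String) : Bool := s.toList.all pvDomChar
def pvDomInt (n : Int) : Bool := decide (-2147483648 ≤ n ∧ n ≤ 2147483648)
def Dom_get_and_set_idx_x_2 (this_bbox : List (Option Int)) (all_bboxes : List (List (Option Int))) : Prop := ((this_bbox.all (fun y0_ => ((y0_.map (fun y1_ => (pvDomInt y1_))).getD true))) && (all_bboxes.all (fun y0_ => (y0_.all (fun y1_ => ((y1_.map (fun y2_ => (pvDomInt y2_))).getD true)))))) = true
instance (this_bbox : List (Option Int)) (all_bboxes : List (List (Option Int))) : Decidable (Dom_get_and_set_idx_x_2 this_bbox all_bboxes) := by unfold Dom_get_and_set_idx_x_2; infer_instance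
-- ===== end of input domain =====

-- B replaces A's self-memoizing recursion by an iterative chain walk that picks each left
-- neighbour with a single max() scan instead of filter+sort, and assigns depths back-to-front.
-- Both versions set IDX_X on every box of the chain in place; the equivalence proved here is
-- about the RETURN value only (the mutations coincide as well, but are not modelled).

-- ===== PORT A =====
-- A-side coordinate access: b[i] when it is a present, non-None entry (Python raises
-- IndexError/TypeError otherwise; such inputs are outside Pre_)
def pvCoord (b : List (Option Int)) (i : Int) : Option Int := (PySem.List.pyGet? b i).bind id

-- the filter condition of find_left_nearest_bbox; the inner list mirrors Python's any([...]);
-- the `false` branch = inputs where Python would raise (None coordinate / short box), excluded by Pre_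
def pvCond (this_bbox box : List (Option Int)) : Bool :=
  match pvCoord box 2, pvCoord this_bbox 0, pvCoord box 1, pvCoord box 3,
        pvCoord this_bbox 1, pvCoord this_bbox 3 with
  | some bx1, some tx0, some by0, some by1, some ty0, some ty1 =>
      decide (bx1 ≤ tx0) &&
        ([decide (by0 < ty0) && decide (ty0 < by1),
          decide (by0 < ty1) && decide (ty1 < by1),
          decide (ty0 < by0) && decide (by0 < ty1),
          decide (ty0 < by1) && decide (by1 < ty1),
          decide (by0 = ty0) && decide (by1 = ty1)].any id)
  | _, _, _, _, _, _ => false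

-- sort key x[X1_IDX]; the `.getD 0` default is never used on filtered boxes (their x1 is some)
def find_left_nearest_bbox (this_bbox : List (Option Int)) (all_bboxes : List (List (Option Int))) : List (List (Option Int)) :=
  let left_boxes := all_bboxes.filter (fun box => pvCond this_bbox box)
  if left_boxes.length > 0 then
    match PySem.List.sorted left_boxes (fun x => (pvCoord x 2).getD 0) true with
    | m :: _ => [m]
    | [] => []
  else []

-- A's recursion; the fuel all_bboxes.length+1 is a totality guard only — under Pre_ the
-- chain visits pairwise distinct boxes, so it never runs out on inputs where Python returns
def pvGoA : Nat → List (Option Int) → List (List (Option Int)) → Int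
  | 0, _, _ => 0
  | f + 1, this_bbox, all_bboxes =>
    match pvCoord this_bbox 5 with
    | some v => v
    | none =>
      match find_left_nearest_bbox this_bbox all_bboxes with
      | [] => 0
      | l :: _ => pvGoA f l all_bboxes + 1

def get_and_set_idx_x_2 (this_bbox : List (Option Int)) (all_bboxes : List (List (Option Int))) : Int :=
  pvGoA (all_bboxes.length + 1) this_bbox all_bboxes

-- ===== PORT B =====
-- B-side coordinate read for the constant non-negative indices B uses (same raising
-- convention as above: none = Python raises there, excluded by Pre_)
def bRead (b : List (Option Int)) (i : Nat) : Option Int := (b[i]?).bind id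

-- B's _overlaps helper (an or-chain, not a list)
def bOverlaps (cur box : List (Option Int)) : Bool :=
  match bRead cur 1, bRead cur 3, bRead box 1, bRead box 3 with
  | some t0, some t1, some b0, some b1 =>
      (decide (b0 < t0) && decide (t0 < b1)) ||
      (decide (b0 < t1) && decide (t1 < b1)) ||
      (decide (t0 < b0) && decide (b0 < t1)) ||
      (decide (t0 < b1) && decide (b1 < t1)) ||
      (decide (b0 = t0) && decide (b1 = t1))
  | _, _, _, _ => false

-- the comprehension test 'b[X1_IDX] <= cur[X0_IDX] and _overlaps(cur, b)'
def bTest (cur box : List (Option Int)) : Bool :=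
  match bRead box 2, bRead cur 0 with
  | some bx1, some tx0 => decide (bx1 ≤ tx0) && bOverlaps cur box
  | _, _ => false

-- one loop step: 'max(cands, key=lambda b: b[X1_IDX])' over the comprehension (none = no cands);
-- the `.getD 0` default is never used on candidates (their x1 is some)
def bStep (cur : List (Option Int)) (all_bboxes : List (List (Option Int))) : Option (List (Option Int)) :=
  PySem.List.max? (all_bboxes.filter (fun b => bTest cur b)) (fun b => (bRead b 2).getD 0)

-- B's while-loop: returns (len(chain), base); the final reversed-assignment pass of Source B
-- makes this_bbox's value base + len(chain), computed by the caller below.  Fuel is the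
-- same totality guard as on the A side.
def bWalk : Nat → List (Option Int) → List (List (Option Int)) → Nat × Int
  | 0, _, _ => (0, 0)
  | f + 1, cur, all_bboxes =>
    match bRead cur 5 with
    | some base => (0, base)
    | none =>
      match bStep cur all_bboxes with
      | none => (0, 0)
      | some nxt => let p := bWalk f nxt all_bboxes; (p.1 + 1, p.2)

def get_and_set_idx_x_2_alt (this_bbox : List (Option Int)) (all_bboxes : List (List (Option Int))) : Int :=
  let p := bWalk (all_bboxes.length + 1) this_bbox all_bboxes
  p.2 + (p.1 : Int)

-- ===== PRECONDITION & SPEC =====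
-- a well-formed bbox: indices 0..3 present and non-None, x0 < x1, and slot 5 exists
def pvOkBox (b : List (Option Int)) : Bool :=
  match pvCoord b 0, pvCoord b 1, pvCoord b 2, pvCoord b 3 with
  | some x0, some _, some x1, some _ => decide (6 ≤ b.length) && decide (x0 < x1)
  | _, _, _, _ => false

-- Pre_ excludes inputs where Python A raises (IndexError/TypeError on a missing/None
-- coordinate, RecursionError on a cyclic chain of degenerate boxes).  It is slightly
-- narrower than exact non-raising: it also requires boxes the x-filter short-circuits past
-- to be well-formed (see claim.json cites).
def Pre_get_and_set_idx_x_2 (this_bbox : List (Option Int)) (all_bboxes : List (List (Option Int))) : Prop :=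
  (pvCoord this_bbox 5).isSome = true ∨
    (pvOkBox this_bbox = true ∧ ∀ b ∈ all_bboxes, pvOkBox b = true)

instance (this_bbox : List (Option Int)) (all_bboxes : List (List (Option Int))) : Decidable (Pre_get_and_set_idx_x_2 this_bbox all_bboxes) := by
  unfold Pre_get_and_set_idx_x_2; infer_instance

def pvWitness_get_and_set_idx_x_2 : List (Option Int) × List (List (Option Int)) :=
  ([some 0, some 0, some 1, some 1, none, none],
   [[some (-3), some 0, some (-1), some 1, none, none]])

def Spec_get_and_set_idx_x_2 (this_bbox : List (Option Int)) (all_bboxes : List (List (Option Int))) (out : Int) : Prop := out = get_and_set_idx_x_2_alt this_bbox all_bboxes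
instance (this_bbox : List (Option Int)) (all_bboxes : List (List (Option Int))) (out : Int) : Decidable (Spec_get_and_set_idx_x_2 this_bbox all_bboxes out) := by unfold Spec_get_and_set_idx_x_2; infer_instance

-- ===== CLAIM (what is proved, stated in full; the proofs are below) =====
def Claim_equal_get_and_set_idx_x_2 : Prop := ∀ (this_bbox : List (Option Int)) (all_bboxes : List (List (Option Int))), Dom_get_and_set_idx_x_2 this_bbox all_bboxes → Pre_get_and_set_idx_x_2 this_bbox all_bboxes → Spec_get_and_set_idx_x_2 this_bbox all_bboxes (get_and_set_idx_x_2 this_bbox all_bboxes)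

-- ===== LEMMAS AND PROOFS =====
-- the two coordinate readers agree on natural-number indices
theorem pvCoord_eq_bRead (b : List (Option Int)) (n : Nat) :
    pvCoord b (n : Int) = bRead b n := by
  unfold pvCoord bRead
  simp [PySem.List.pyGet?, PySem.List.pyIdx?]
  split
  · simp
  · rename_i h
    rw [List.getElem?_eq_none (by omega)]
    simp

theorem pvCoord0 (b : List (Option Int)) : pvCoord b 0 = bRead b 0 := by
  exact_mod_cast pvCoord_eq_bRead b 0
theorem pvCoord1 (b : List (Option Int)) : pvCoord b 1 = bRead b 1 := by
  exact_mod_cast pvCoord_eq_bRead b 1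
theorem pvCoord2 (b : List (Option Int)) : pvCoord b 2 = bRead b 2 := by
  exact_mod_cast pvCoord_eq_bRead b 2
theorem pvCoord3 (b : List (Option Int)) : pvCoord b 3 = bRead b 3 := by
  exact_mod_cast pvCoord_eq_bRead b 3
theorem pvCoord5 (b : List (Option Int)) : pvCoord b 5 = bRead b 5 := by
  exact_mod_cast pvCoord_eq_bRead b 5

-- the two filter predicates agree
theorem bTest_eq_pvCond (cur box : List (Option Int)) :
    bTest cur box = pvCond cur box := by
  unfold bTest bOverlaps pvCond
  rw [pvCoord0, pvCoord1, pvCoord1, pvCoord2, pvCoord3, pvCoord3]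
  cases bRead box 2 <;> cases bRead cur 0 <;> cases bRead box 1 <;>
    cases bRead box 3 <;> cases bRead cur 1 <;> cases bRead cur 3 <;>
    simp [List.any_cons, Bool.or_assoc]

-- head of Python's reverse-sorted list = Python's max (first maximal element)
theorem insertBy_head {A K : Type} [LinearOrder K] (key : A -> K) (x : A) (acc : List A) :
    (PySem.List.insertBy (fun a b => decide (key b < key a)) x acc).head? =
      (match acc.head? with
       | none => some x
       | some m => if key m < key x then some x else some m) := by
  cases acc with
  | nil => simp [PySem.List.insertBy]
  | cons y ys =>
    by_cases h : key y < key x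
    · simp [PySem.List.insertBy, h]
    · simp [PySem.List.insertBy, h]

theorem foldl_insertBy_head {A K : Type} [LinearOrder K] (key : A -> K)
    (xs : List A) : forall (acc : List A),
    (xs.foldl (fun a x => PySem.List.insertBy (fun a b => decide (key b < key a)) x a) acc).head? =
      xs.foldl (fun o x =>
        match o with
        | none => some x
        | some m => if key m < key x then some x else some m) acc.head? := by
  induction xs with
  | nil => intro acc; rfl
  | cons x t ih =>
    intro acc
    simp only [List.foldl_cons]
    rw [ih, insertBy_head]

theorem head_sorted_rev_eq_max? {A K : Type} [LinearOrder K]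
    (xs : List A) (key : A -> K) :
    (PySem.List.sorted xs key true).head? = PySem.List.max? xs key := by
  simp only [PySem.List.sorted, PySem.List.max?, if_true]
  rw [foldl_insertBy_head]
  rfl

-- B's loop step is the head of A's find_left_nearest_bbox
theorem bStep_eq_head (cur : List (Option Int)) (all_bboxes : List (List (Option Int))) :
    bStep cur all_bboxes = (find_left_nearest_bbox cur all_bboxes).head? := by
  unfold bStep find_left_nearest_bbox
  rw [List.filter_congr (fun b _ => bTest_eq_pvCond cur b)]
  rw [show (fun b => (bRead b 2).getD 0) = (fun x : List (Option Int) => (pvCoord x 2).getD 0) from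
        funext fun b => by rw [pvCoord2]]
  rcases hL : all_bboxes.filter (fun box => pvCond cur box) with _ | ⟨m, t⟩
  · simp [PySem.List.max?]
  · have hlen : ((m :: t).length > 0) := by simp
    rw [if_pos hlen, <- head_sorted_rev_eq_max?]
    rcases hs : PySem.List.sorted (m :: t) (fun x => (pvCoord x 2).getD 0) true with _ | ⟨s, u⟩
    · have hp := PySem.List.sorted_perm (m :: t) (fun x : List (Option Int) => (pvCoord x 2).getD 0) true
      rw [hs] at hp
    · rfl

-- the loop invariant: A's recursion = B's base + pending count, at every fuel
theorem pvGoA_eq_bWalk (f : Nat) :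
    forall (cur : List (Option Int)) (all_bboxes : List (List (Option Int))),
      pvGoA f cur all_bboxes = (bWalk f cur all_bboxes).2 + ((bWalk f cur all_bboxes).1 : Int) := by
  induction f with
  | zero => intro cur all_bboxes; simp [pvGoA, bWalk]
  | succ f ih =>
    intro cur all_bboxes
    simp only [pvGoA, bWalk, pvCoord5]
    cases bRead cur 5 with
    | some v => simp
    | none =>
      rw [bStep_eq_head]
      cases hF : find_left_nearest_bbox cur all_bboxes with
      | nil => simp
      | cons l t =>
        simp only [List.head?_cons]
        rw [ih]
        push_cast
        ring
-- ===== VERDICT (by name: the statement is the Claim_ definition above) =====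
theorem get_and_set_idx_x_2_spec : Claim_equal_get_and_set_idx_x_2 := by
  intro this_bbox all_bboxes _ _
  unfold Spec_get_and_set_idx_x_2 get_and_set_idx_x_2 get_and_set_idx_x_2_alt
  exact pvGoA_eq_bWalk _ _ _
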